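/- GENERATED by farm/mkstatement.py from design/units.tsv (unit `start_decoder.R1b`) and the assertions of Vorbis/Spec/StartDecoderR1.lean — do not edit.
   THE STATEMENT of the proof unit `start_decoder.R1b`: segment R1b of `start_decoder` (8 instructions; entries 0x115905;
   exits 0x11592a; ranges 0x115905-0x115925)
   takes each of its entry assertions to one of its exit assertions (`Vorbis.Spec.StartDecoder.SegR1b`), given the contracts of its callees.
   What the names mean: Vorbis/Spec/Basic.lean (the shared hypotheses), Vorbis/Spec/StartDecoderR1.lean (the assertions). The theorem to prove:
   `theorem start_decoder_R1b_ok : Vorbis.Spec.start_decoder_R1b.Statement`. -/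
import Vorbis.Spec.Alloc
import Vorbis.Spec.StartDecoderR1
namespace Vorbis.Spec.start_decoder_R1b
open X86 X86.User Asan

/-- The statement of unit `start_decoder.R1b`. -/
def Statement : Prop :=
  ∀ (Lay : Layout) (_hLay : Lay.hi = 0x1000000) (μ : Microarch) (_hμ : UserX.MicroOK μ) (u₀ : State)
    (_hcode : HasCodeNat Lay u₀ Vorbis.L.start_decoder.entry Vorbis.Code.code_start_decoder.nat Vorbis.L.start_decoder.size)
    (_h_asan_store4_noabort : Asan.SmallCheck Lay μ Vorbis.WayInv (Vorbis.CodeOK u₀) [.rax, .rcx, .rdx] 4 Vorbis.L.__asan_store4_noabort.entry)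
    (_h_setup_malloc : ∀ (others : List Obj) (frames : List (Nat × FrameLayout)) (A : Arena), Calls Lay μ Vorbis.WayInv (Vorbis.conv u₀) Vorbis.L.setup_malloc.entry (Vorbis.Spec.setup_malloc.spec others frames A)),
    Vorbis.Spec.StartDecoder.SegR1b Lay μ u₀

end Vorbis.Spec.start_decoder_R1b
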